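/- GENERATED by farm/mkstatement.py from design/units.tsv (unit `DGifBufferedInput.2`) and the assertions of Gif/Spec/Seg_DGifBufferedInput.lean — do not edit.
   THE STATEMENT of the proof unit `DGifBufferedInput.2`: segment 2 of `DGifBufferedInput` (22 instructions; entries 0x1065a8;
   exits 0x10659d,0x1065fe; ranges 0x1065a8-0x1065fe)
   takes each of its entry assertions to one of its exit assertions (`Gif.Spec.DGifBufferedInput.Seg2`), given the contracts of its callees.
   What the names mean: ProgX/Base/Spec/Basic.lean (the shared hypotheses), Gif/Spec/Seg_DGifBufferedInput.lean (the assertions). The theorem to prove: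
   `theorem DGifBufferedInput_2_ok : Gif.Spec.DGifBufferedInput_2.Statement`. -/
import Gif.Code
import Gif.Dec.All
import Gif.Labels
import Gif.Spec.Reader
import Gif.Spec.Seg_DGifBufferedInput
namespace Gif.Spec.DGifBufferedInput_2
open X86 X86.User Asan

/-- The statement of unit `DGifBufferedInput.2`. -/
def Statement : Prop :=
  ∀ (Lay : Layout) (_hLay : Lay.hi = 0x1000000) (μ : Microarch) (_hμ : UserX.MicroOK μ) (u₀ : State)
    (_hcode : HasCodeNat Lay u₀ Gif.L.DGifBufferedInput.entry Gif.Code.code_DGifBufferedInput.nat Gif.L.DGifBufferedInput.size)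
    (_h_InternalRead : ∀ (H : Heap) (rest : List Obj) (frames : List (Nat × FrameLayout)) (F : Forest) (R : Rd) (n : Nat), Calls Lay μ ProgX.Base.WayInv (ProgX.Base.conv u₀) Gif.L.InternalRead.entry (Gif.Spec.InternalRead.spec H rest frames F R n))
    (_h_asan_load1_noabort : Asan.SmallCheck Lay μ ProgX.Base.WayInv (ProgX.Base.CodeOK u₀) [.rax, .rdx] 1 ProgX.Base.L.__asan_load1_noabort.entry)
    (_h_asan_store4_noabort : Asan.SmallCheck Lay μ ProgX.Base.WayInv (ProgX.Base.CodeOK u₀) [.rax, .rcx, .rdx] 4 ProgX.Base.L.__asan_store4_noabort.entry),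
    Gif.Spec.DGifBufferedInput.Seg2 Lay μ u₀

end Gif.Spec.DGifBufferedInput_2
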